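-- pv_equiv track=rewrite | github.com/apabon123/futures-six | scripts/run_csmom_sanity.py | parse_universe
-- ===== SOURCE A (Python) =====
-- from typing import Optional
--
-- def parse_universe(universe_str: Optional[str]) -> Optional[list]:
--     """
--     Parse comma-separated universe string into list.
--
--     Args:
--         universe_str: Comma-separated string like "ES,NQ,RTY" or None
--
--     Returns:
--         List of symbols or None
--     """
--     if universe_str is None or universe_str.strip() == "":
--         return None
--
--     # Split by comma and strip whitespace
--     symbols = [s.strip() for s in universe_str.split(',') if s.strip()]
--
--     if not symbols:
--         return None
--
--     # Map short names to database symbols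
--     # Based on MarketData mapping logic:
--     # - Equities (ES, NQ, RTY): *_FRONT_CALENDAR_2D
--     # - Rates volume (ZT, ZF, ZN, UB): *_FRONT_VOLUME
--     # - Rates calendar (SR3): SR3_FRONT_CALENDAR
--     # - FX (6E, 6B, 6J): *_FRONT_CALENDAR
--     # - Commodities (CL, GC): *_FRONT_VOLUME
--
--     fx_symbols = {'6E', '6B', '6J'}
--     equity_symbols = {'ES', 'NQ', 'RTY'}
--     rates_volume = {'ZT', 'ZF', 'ZN', 'UB'}
--     rates_calendar = {'SR3'}
--     commodities = {'CL', 'GC'}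
--
--     db_symbols = []
--     for sym in symbols:
--         if sym in equity_symbols:
--             db_symbols.append(f"{sym}_FRONT_CALENDAR_2D")
--         elif sym in rates_volume:
--             db_symbols.append(f"{sym}_FRONT_VOLUME")
--         elif sym in rates_calendar:
--             db_symbols.append(f"{sym}_FRONT_CALENDAR")
--         elif sym in fx_symbols:
--             db_symbols.append(f"{sym}_FRONT_CALENDAR")
--         elif sym in commodities:
--             db_symbols.append(f"{sym}_FRONT_VOLUME")
--         else:
--             # Assume it's already a database symbol
--             db_symbols.append(sym)
--
--     return db_symbols
-- ===== SOURCE B (Python) =====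
-- from typing import Optional
--
-- # Category suffixes appended to the short symbol; unknown symbols get no suffix.
-- _SUFFIX = {
--     'ES': '_FRONT_CALENDAR_2D', 'NQ': '_FRONT_CALENDAR_2D', 'RTY': '_FRONT_CALENDAR_2D',
--     'ZT': '_FRONT_VOLUME', 'ZF': '_FRONT_VOLUME', 'ZN': '_FRONT_VOLUME', 'UB': '_FRONT_VOLUME',
--     'CL': '_FRONT_VOLUME', 'GC': '_FRONT_VOLUME',
--     'SR3': '_FRONT_CALENDAR',
--     '6E': '_FRONT_CALENDAR', '6B': '_FRONT_CALENDAR', '6J': '_FRONT_CALENDAR',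
-- }
--
-- def parse_universe(universe_str: Optional[str]) -> Optional[list]:
--     """Single character-level scan: accumulate a token up to each comma, strip and
--     map it immediately; no split(), no separate emptiness guards (empty/whitespace
--     input simply yields no tokens)."""
--     if universe_str is None:
--         return None
--     out = []
--     token = ''
--     for ch in universe_str + ',':
--         if ch == ',':
--             sym = token.strip()
--             if sym:
--                 out.append(sym + _SUFFIX.get(sym, ''))
--             token = ''
--         else:
--             token += ch
--     return out or None
-- ===== Notes on version B (the rewrite author's own statement) =====
-- stated objective: alternative
-- what changed: B replaces A's split-then-filter-then-map pipeline with its five membership sets by a single character-level scan over the input plus a trailing separator, accumulating each token and stripping and mapping it the moment the separator is reached via one suffix table with an empty-suffix fallback; A's separate empty/whitespace guards disappear because an all-whitespace scan simply yields no tokens.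
import Mathlib
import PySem

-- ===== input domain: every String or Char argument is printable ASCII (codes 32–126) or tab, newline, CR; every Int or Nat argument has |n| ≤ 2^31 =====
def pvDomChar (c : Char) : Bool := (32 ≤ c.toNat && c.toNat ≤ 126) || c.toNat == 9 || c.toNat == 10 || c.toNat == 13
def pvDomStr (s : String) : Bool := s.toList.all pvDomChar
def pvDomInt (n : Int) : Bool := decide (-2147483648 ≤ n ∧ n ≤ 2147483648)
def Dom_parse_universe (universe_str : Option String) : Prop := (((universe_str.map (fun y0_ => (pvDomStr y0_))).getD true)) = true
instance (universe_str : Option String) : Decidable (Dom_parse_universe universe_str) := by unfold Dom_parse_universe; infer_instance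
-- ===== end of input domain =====

-- B replaces A's split/filter/map pipeline over five membership sets by one character-level
-- scan that strips and maps each token at the comma, with a single suffix table; same results.

-- ===== PORT A =====
def pvCascade (sym : String) : String :=
  let fx_symbols : PySem.Set String := PySem.Set.ofList ["6E", "6B", "6J"]
  let equity_symbols : PySem.Set String := PySem.Set.ofList ["ES", "NQ", "RTY"]
  let rates_volume : PySem.Set String := PySem.Set.ofList ["ZT", "ZF", "ZN", "UB"]
  let rates_calendar : PySem.Set String := PySem.Set.ofList ["SR3"]
  let commodities : PySem.Set String := PySem.Set.ofList ["CL", "GC"]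
  if PySem.Set.contains equity_symbols sym then sym ++ "_FRONT_CALENDAR_2D"
  else if PySem.Set.contains rates_volume sym then sym ++ "_FRONT_VOLUME"
  else if PySem.Set.contains rates_calendar sym then sym ++ "_FRONT_CALENDAR"
  else if PySem.Set.contains fx_symbols sym then sym ++ "_FRONT_CALENDAR"
  else if PySem.Set.contains commodities sym then sym ++ "_FRONT_VOLUME"
  else sym

def parse_universe (universe_str : Option String) : Option (List String) :=
  match universe_str with
  | none => none
  | some s =>
    if PySem.Str.strip s = "" then none
    else
      -- split? is always `some` here since the separator "," is nonempty
      let symbols :=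
        (((PySem.Str.split? s ",").getD []).filter (fun t => PySem.Str.strip t ≠ "")).map PySem.Str.strip
      if symbols = [] then none
      else some (symbols.foldl (fun db sym => db ++ [pvCascade sym]) [])

-- ===== PORT B =====
-- the _SUFFIX dict of Source B, keyed/valued on the char lists of the Python strings
def pvSuffix : PySem.Dict (List Char) (List Char) :=
  PySem.Dict.ofList
  [("ES".toList, "_FRONT_CALENDAR_2D".toList), ("NQ".toList, "_FRONT_CALENDAR_2D".toList),
   ("RTY".toList, "_FRONT_CALENDAR_2D".toList),
   ("ZT".toList, "_FRONT_VOLUME".toList), ("ZF".toList, "_FRONT_VOLUME".toList),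
   ("ZN".toList, "_FRONT_VOLUME".toList), ("UB".toList, "_FRONT_VOLUME".toList),
   ("CL".toList, "_FRONT_VOLUME".toList), ("GC".toList, "_FRONT_VOLUME".toList),
   ("SR3".toList, "_FRONT_CALENDAR".toList),
   ("6E".toList, "_FRONT_CALENDAR".toList), ("6B".toList, "_FRONT_CALENDAR".toList),
   ("6J".toList, "_FRONT_CALENDAR".toList)]

-- Source B's for-loop over the characters of `universe_str + ','` (iterating a Python str
-- yields its code points, exactly this list); `token`, `out` are the loop state.
def pvScan : List Char → List Char → List String → List String
  | [], _token, out => out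
  | c :: cs, token, out =>
    if c = ',' then
      let sym := PySem.Chars.strip token
      pvScan cs []
        (if sym ≠ [] then out ++ [String.ofList (sym ++ PySem.Dict.getD pvSuffix sym [])] else out)
    else pvScan cs (token ++ [c]) out

def parse_universe_alt (universe_str : Option String) : Option (List String) :=
  match universe_str with
  | none => none
  | some s =>
    let out := pvScan (s.toList ++ [',']) [] []
    -- `return out or None`
    if out = [] then none else some out

-- ===== PRECONDITION & SPEC =====
def Spec_parse_universe (universe_str : Option String) (out : Option (List String)) : Prop := out = parse_universe_alt universe_str
instance (universe_str : Option String) (out : Option (List String)) : Decidable (Spec_parse_universe universe_str out) := by unfold Spec_parse_universe; infer_instance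

-- ===== CLAIM (what is proved, stated in full; the proofs are below) =====
def Claim_equal_parse_universe : Prop := ∀ (universe_str : Option String), Dom_parse_universe universe_str → Spec_parse_universe universe_str (parse_universe universe_str)

-- ===== LEMMAS AND PROOFS =====

-- prepend a prefix to the first token (the scanner's pending `token` joins the head piece)
def pvConsHead (p : List Char) : List (List Char) → List (List Char)
  | [] => [p]
  | x :: xs => (p ++ x) :: xs

-- what both programs emit for a token list
def pvEmit (toks : List (List Char)) : List String :=
  (toks.filter (fun t => PySem.Chars.strip t ≠ [])).map
    (fun t => String.ofList (PySem.Chars.strip t ++ PySem.Dict.getD pvSuffix (PySem.Chars.strip t) []))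

theorem pvCascade_eq (sym : String) :
    pvCascade sym = String.ofList (sym.toList ++ PySem.Dict.getD pvSuffix sym.toList []) := by
  rcases eq_or_ne sym "ES" with h | hES; · subst h; decide
  rcases eq_or_ne sym "NQ" with h | hNQ; · subst h; decide
  rcases eq_or_ne sym "RTY" with h | hRTY; · subst h; decide
  rcases eq_or_ne sym "ZT" with h | hZT; · subst h; decide
  rcases eq_or_ne sym "ZF" with h | hZF; · subst h; decide
  rcases eq_or_ne sym "ZN" with h | hZN; · subst h; decide
  rcases eq_or_ne sym "UB" with h | hUB; · subst h; decide
  rcases eq_or_ne sym "SR3" with h | hSR3; · subst h; decide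
  rcases eq_or_ne sym "6E" with h | h6E; · subst h; decide
  rcases eq_or_ne sym "6B" with h | h6B; · subst h; decide
  rcases eq_or_ne sym "6J" with h | h6J; · subst h; decide
  rcases eq_or_ne sym "CL" with h | hCL; · subst h; decide
  rcases eq_or_ne sym "GC" with h | hGC; · subst h; decide
  have hnone : PySem.Dict.get? pvSuffix sym.toList = none := by
    rw [PySem.Dict.get?_eq_none_iff_not_mem_keys]
    have hk : pvSuffix.keys = ["ES".toList, "NQ".toList, "RTY".toList, "ZT".toList, "ZF".toList,
        "ZN".toList, "UB".toList, "CL".toList, "GC".toList, "SR3".toList, "6E".toList,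
        "6B".toList, "6J".toList] := rfl
    have hi : ∀ (t : String) (l : List Char), t.toList = l → sym ≠ t → sym.toList ≠ l :=
      fun t l hl hne h => hne (String.toList_inj.mp (h.trans hl.symm))
    rw [hk]
    simp only [List.mem_cons, List.not_mem_nil, or_false, not_or]
    exact ⟨hi _ _ rfl hES, hi _ _ rfl hNQ, hi _ _ rfl hRTY, hi _ _ rfl hZT, hi _ _ rfl hZF,
           hi _ _ rfl hZN, hi _ _ rfl hUB, hi _ _ rfl hCL, hi _ _ rfl hGC, hi _ _ rfl hSR3,
           hi _ _ rfl h6E, hi _ _ rfl h6B, hi _ _ rfl h6J⟩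
  simp [pvCascade, PySem.Set.contains, PySem.Set.ofList, PySem.Dict.getD, hnone,
        hES, hNQ, hRTY, hZT, hZF, hZN, hUB, hSR3, h6E, h6B, h6J, hCL, hGC]

theorem pvEmit_cons (x : List Char) (xs : List (List Char)) :
    pvEmit (x :: xs)
      = (if PySem.Chars.strip x ≠ [] then
          [String.ofList (PySem.Chars.strip x ++ PySem.Dict.getD pvSuffix (PySem.Chars.strip x) [])]
         else []) ++ pvEmit xs := by
  simp only [pvEmit, List.filter_cons]
  split_ifs with h <;> simp_all

-- scanner run = emit over the comma-split tokens, with `token` joined onto the first piece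
theorem pvScan_eq (l : List Char) (token : List Char) (out : List String) :
    pvScan (l ++ [',']) token out
      = out ++ pvEmit (pvConsHead token (List.splitOnP (fun c => c == ',') l)) := by
  induction l generalizing token out with
  | nil =>
    simp only [List.nil_append, pvScan, List.splitOnP_nil, pvConsHead,
      List.append_nil]
    rw [pvEmit_cons]
    simp only [pvEmit, List.filter_nil, List.map_nil, List.append_nil]
    split_ifs with h <;> simp [pvScan]
  | cons c cs ih =>
    by_cases hc : c = ','
    · subst hc
      have hsplit : List.splitOnP (fun c => c == ',') (',' :: cs)
          = [] :: List.splitOnP (fun c => c == ',') cs := by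
        simp [List.splitOnP_cons]
      have h1 : pvScan ((',' :: cs) ++ [',']) token out
          = pvScan (cs ++ [','])
              [] (if PySem.Chars.strip token ≠ [] then
                    out ++ [String.ofList (PySem.Chars.strip token ++
                      PySem.Dict.getD pvSuffix (PySem.Chars.strip token) [])]
                  else out) := by
        simp [pvScan]
      rw [h1, ih, hsplit]
      obtain ⟨h, t, ht⟩ : ∃ h t, List.splitOnP (fun c => c == ',') cs = h :: t := by
        rcases e : List.splitOnP (fun c => c == ',') cs with _ | ⟨h, t⟩
        · exact absurd e (List.splitOnP_ne_nil _ _)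
        · exact ⟨h, t, rfl⟩
      rw [ht]
      simp only [pvConsHead, List.nil_append, List.append_nil]
      rw [pvEmit_cons token (h :: t)]
      split_ifs <;> simp
    · simp only [List.cons_append, pvScan, if_neg hc]
      rw [ih, List.splitOnP_cons]
      have : (c == ',') = false := by simp [hc]
      rw [this]
      simp only [Bool.false_eq_true, if_false]
      obtain ⟨h, t, ht⟩ : ∃ h t, List.splitOnP (fun c => c == ',') cs = h :: t := by
        rcases e : List.splitOnP (fun c => c == ',') cs with _ | ⟨h, t⟩
        · exact absurd e (List.splitOnP_ne_nil _ _)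
        · exact ⟨h, t, rfl⟩
      rw [ht]
      simp [pvConsHead]

theorem pvGo (fuel : Nat) (l cur : List Char) (acc : List (List Char)) (h : l.length ≤ fuel) :
    PySem.Chars.splitOn.go [','] fuel l cur acc
      = acc.reverse ++ pvConsHead cur.reverse (List.splitOnP (fun c => c == ',') l) := by
  induction fuel generalizing l cur acc with
  | zero =>
    have hl : l = [] := List.eq_nil_of_length_eq_zero (Nat.le_zero.mp h)
    subst hl
    simp [PySem.Chars.splitOn.go, pvConsHead, List.splitOnP_nil]
  | succ fuel ih =>
    cases l with
    | nil => simp [PySem.Chars.splitOn.go, pvConsHead, List.splitOnP_nil]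
    | cons c cs =>
      rw [PySem.Chars.splitOn.go]
      by_cases hc : c = ','
      · subst hc
        have hp : [','].isPrefixOf (',' :: cs) = true := by simp [List.isPrefixOf]
        rw [if_pos hp]
        simp only [List.length, List.drop_succ_cons, List.drop_zero]
        rw [ih cs [] (cur.reverse :: acc) (by simpa using Nat.le_of_succ_le_succ h)]
        rw [List.splitOnP_cons]
        simp only [BEq.rfl]
        obtain ⟨hd, t, ht⟩ : ∃ hd t, List.splitOnP (fun c => c == ',') cs = hd :: t := by
          rcases e : List.splitOnP (fun c => c == ',') cs with _ | ⟨hd, t⟩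
          · exact absurd e (List.splitOnP_ne_nil _ _)
          · exact ⟨hd, t, rfl⟩
        rw [ht]
        simp [pvConsHead]
      · have hp : [','].isPrefixOf (c :: cs) = false := by
          simp only [List.isPrefixOf, Bool.and_eq_false_iff, beq_eq_false_iff_ne]
          exact Or.inl fun h => hc h.symm
        rw [if_neg (by simp [hp])]
        rw [ih cs (c :: cur) acc (by simpa using Nat.le_of_succ_le_succ h)]
        rw [List.splitOnP_cons]
        have : (c == ',') = false := by simp [hc]
        rw [this]
        simp only [Bool.false_eq_true, if_false]
        obtain ⟨hd, t, ht⟩ : ∃ hd t, List.splitOnP (fun c => c == ',') cs = hd :: t := by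
          rcases e : List.splitOnP (fun c => c == ',') cs with _ | ⟨hd, t⟩
          · exact absurd e (List.splitOnP_ne_nil _ _)
          · exact ⟨hd, t, rfl⟩
        rw [ht]
        simp [pvConsHead]

theorem pvSplitOn_single (l : List Char) :
    PySem.Chars.splitOn l [','] = List.splitOnP (fun c => c == ',') l := by
  rw [PySem.Chars.splitOn, pvGo l.length.succ l [] [] (Nat.le_succ _)]
  obtain ⟨hd, t, ht⟩ : ∃ hd t, List.splitOnP (fun c => c == ',') l = hd :: t := by
    rcases e : List.splitOnP (fun c => c == ',') l with _ | ⟨hd, t⟩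
    · exact absurd e (List.splitOnP_ne_nil _ _)
    · exact ⟨hd, t, rfl⟩
  rw [ht]
  simp [pvConsHead]

theorem pvStrip_nil_of_all_space (t : List Char) (h : ∀ c ∈ t, PySem.Chars.isspace c = true) :
    PySem.Chars.strip t = [] := by
  have h1 : PySem.Chars.lstrip t = [] := by
    exact List.dropWhile_eq_nil_iff.mpr h
  simp [PySem.Chars.strip, h1, PySem.Chars.rstrip]

theorem pvMem_of_mem_splitOnP (l t : List Char) (c : Char)
    (ht : t ∈ List.splitOnP (fun c => c == ',') l) (hc : c ∈ t) : c ∈ l := by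
  induction l generalizing t with
  | nil =>
    simp [List.splitOnP_nil] at ht
    subst ht; exact absurd hc (List.not_mem_nil)
  | cons a l ih =>
    rw [List.splitOnP_cons] at ht
    by_cases ha : (a == ',') = true
    · rw [if_pos ha] at ht
      rcases List.mem_cons.mp ht with h | h
      · subst h; exact absurd hc (List.not_mem_nil)
      · exact List.mem_cons_of_mem _ (ih t h hc)
    · rw [if_neg ha] at ht
      obtain ⟨hd, tl, he⟩ : ∃ hd tl, List.splitOnP (fun c => c == ',') l = hd :: tl := by
        rcases e : List.splitOnP (fun c => c == ',') l with _ | ⟨hd, tl⟩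
        · exact absurd e (List.splitOnP_ne_nil _ _)
        · exact ⟨hd, tl, rfl⟩
      rw [he] at ht
      rcases List.mem_cons.mp ht with h | h
      · subst h
        rcases List.mem_cons.mp hc with h | h
        · exact h ▸ List.mem_cons_self
        · exact List.mem_cons_of_mem _ (ih hd (he ▸ List.mem_cons_self) h)
      · exact List.mem_cons_of_mem _ (ih t (he ▸ List.mem_cons_of_mem _ h) hc)

theorem pvAllSpace_emit_nil (l : List Char) (h : ∀ c ∈ l, PySem.Chars.isspace c = true) :
    pvEmit (List.splitOnP (fun c => c == ',') l) = [] := by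
  rw [pvEmit, List.map_eq_nil_iff, List.filter_eq_nil_iff]
  intro t ht
  simp only [ne_eq, decide_not, Bool.not_eq_eq_eq_not, Bool.not_true, decide_eq_false_iff_not,
    Decidable.not_not]
  exact pvStrip_nil_of_all_space t (fun c hc => h c (pvMem_of_mem_splitOnP l t c ht hc))

theorem pvAllSpace_of_strip_nil (l : List Char) (h : PySem.Chars.strip l = []) :
    ∀ c ∈ l, PySem.Chars.isspace c = true := by
  have h2 : (List.dropWhile PySem.Chars.isspace
      (List.dropWhile PySem.Chars.isspace l).reverse).reverse = [] := h
  have h3 : List.dropWhile PySem.Chars.isspace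
      (List.dropWhile PySem.Chars.isspace l).reverse = [] := by
    simpa using congrArg List.reverse h2
  have h4 : ∀ c ∈ List.dropWhile PySem.Chars.isspace l, PySem.Chars.isspace c = true := by
    intro c hc
    exact List.dropWhile_eq_nil_iff.mp h3 c (List.mem_reverse.mpr hc)
  intro c hc
  rw [← List.takeWhile_append_dropWhile (p := PySem.Chars.isspace) (l := l)] at hc
  rcases List.mem_append.mp hc with h | h
  · exact List.mem_takeWhile_imp h
  · exact h4 c h

theorem pvScan_run (s : String) :
    pvScan (s.toList ++ [',']) [] []
      = pvEmit (List.splitOnP (fun c => c == ',') s.toList) := by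
  rw [pvScan_eq]
  obtain ⟨hd, t, ht⟩ : ∃ hd t, List.splitOnP (fun c => c == ',') s.toList = hd :: t := by
    rcases e : List.splitOnP (fun c => c == ',') s.toList with _ | ⟨hd, t⟩
    · exact absurd e (List.splitOnP_ne_nil _ _)
    · exact ⟨hd, t, rfl⟩
  rw [ht]
  simp [pvConsHead]

-- the String-level pieces A splits into are the char-level tokens, re-packed
theorem pvSplit_str (s : String) :
    (PySem.Str.split? s ",").getD []
      = (List.splitOnP (fun c => c == ',') s.toList).map String.ofList := by
  have hb := PySem.Str.split?_map s ","
  have hc : PySem.Chars.split? s.toList ",".toList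
      = some (List.splitOnP (fun c => c == ',') s.toList) := by
    rw [show (",".toList) = [','] from rfl, PySem.Chars.split?]
    simp [pvSplitOn_single]
  rw [hc] at hb
  rcases e : PySem.Str.split? s "," with _ | ts
  · rw [e] at hb; simp at hb
  · rw [e] at hb
    simp only [Option.map_some, Option.some.injEq] at hb
    have : ts = (ts.map String.toList).map String.ofList := by
      simp [List.map_map, Function.comp_def]
    rw [Option.getD_some, this, hb]

theorem pvStrip_ofList_ne (t : List Char) :
    (PySem.Str.strip (String.ofList t) ≠ "") ↔ PySem.Chars.strip t ≠ [] := by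
  rw [not_iff_not, ← String.toList_eq_nil_iff, PySem.Str.toList_strip]
  simp

-- ===== VERDICT (by name: the statement is the Claim_ definition above) =====
theorem parse_universe_spec : Claim_equal_parse_universe := by
  intro u _
  unfold Spec_parse_universe parse_universe parse_universe_alt
  cases u with
  | none => rfl
  | some s =>
    simp only [pvScan_run s]
    set toks := List.splitOnP (fun c => c == ',') s.toList with htoks
    have hsym :
        ((((PySem.Str.split? s ",").getD []).filter
            (fun t => PySem.Str.strip t ≠ "")).map PySem.Str.strip)
          = (toks.filter (fun t => PySem.Chars.strip t ≠ [])).map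
              (fun t => PySem.Str.strip (String.ofList t)) := by
      rw [pvSplit_str, List.filter_map, List.map_map]
      congr 1
      · congr 1
        funext t
        simp only [Function.comp_apply]
        exact decide_eq_decide.mpr (pvStrip_ofList_ne t)
    have hmap :
        ((toks.filter (fun t => PySem.Chars.strip t ≠ [])).map
            (fun t => PySem.Str.strip (String.ofList t))).map pvCascade
          = pvEmit toks := by
      rw [pvEmit, List.map_map]
      apply List.map_congr_left
      intro t _
      simp only [Function.comp_apply, pvCascade_eq, PySem.Str.toList_strip]
      simp
    split_ifs with h1 h2 h3 h4 h5
    · rfl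
    · -- strip s = "" but pvEmit ≠ [] : impossible
      exfalso
      apply h2
      apply pvAllSpace_emit_nil
      apply pvAllSpace_of_strip_nil
      have := congrArg String.toList h1
      rw [PySem.Str.toList_strip] at this
      simpa using this
    · rfl
    · -- symbols = [] but pvEmit ≠ []
      exfalso
      apply h4
      rw [hsym] at h3
      have hf := List.map_eq_nil_iff.mp h3
      rw [← hmap, hf]
      simp
    · -- symbols ≠ [] but pvEmit = []
      exfalso
      apply h3
      have hf : (toks.filter (fun t => decide (PySem.Chars.strip t ≠ []))) = [] := by
        rw [pvEmit] at h5
        exact List.map_eq_nil_iff.mp h5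
      rw [hsym, hf]
      simp
    · -- main branch: foldl = map = pvEmit
      rw [PySem.List.foldl_append_singleton_eq_map, hsym, hmap, List.nil_append]
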